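-- pv_equiv track=rewrite | github.com/huberb/eulerproblems | euler71/euler71.py | generate_all_coprime_pairs
-- ===== SOURCE A (Python) =====
-- def generate_coprime_pairs(root, max_value):
--     new_pairs = []
--     new_pairs.append((root[0] * 2 - root[1], root[0]))
--     new_pairs.append((root[0] * 2 + root[1], root[0]))
--     new_pairs.append((root[0] + 2 * root[1], root[1]))
--     return [
--             pair for pair in new_pairs
--             if pair[0] <= max_value and pair[1] <= max_value
--            ]
--
-- def generate_all_coprime_pairs(root, max_value=8):
--     all_pairs = [root]
--     pairs = generate_coprime_pairs(all_pairs[0], max_value)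
--     while len(pairs) > 0:
--         pair = pairs.pop()
--         all_pairs.append(pair)
--         new = generate_coprime_pairs(pair, max_value)
--         pairs += new
--     return all_pairs
-- ===== SOURCE B (Python) =====
-- def generate_all_coprime_pairs(root, max_value=8):
--     def walk(node):
--         a, b = node
--         out = [node]
--         # children in LIFO (reversed-generation) order, filtered inline
--         for child in ((a + 2 * b, b), (a * 2 + b, a), (a * 2 - b, a)):
--             if child[0] <= max_value and child[1] <= max_value:
--                 out.extend(walk(child))
--         return out
--     return walk(root)
-- ===== Notes on version B (the rewrite author's own statement) =====
-- stated objective: alternative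
-- what changed: The explicit-stack LIFO worklist loop is replaced by a recursive preorder tree traversal that visits the (inline-filtered) children in reversed generation order, which reproduces the stack's pop-from-the-end output sequence.
import Mathlib
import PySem

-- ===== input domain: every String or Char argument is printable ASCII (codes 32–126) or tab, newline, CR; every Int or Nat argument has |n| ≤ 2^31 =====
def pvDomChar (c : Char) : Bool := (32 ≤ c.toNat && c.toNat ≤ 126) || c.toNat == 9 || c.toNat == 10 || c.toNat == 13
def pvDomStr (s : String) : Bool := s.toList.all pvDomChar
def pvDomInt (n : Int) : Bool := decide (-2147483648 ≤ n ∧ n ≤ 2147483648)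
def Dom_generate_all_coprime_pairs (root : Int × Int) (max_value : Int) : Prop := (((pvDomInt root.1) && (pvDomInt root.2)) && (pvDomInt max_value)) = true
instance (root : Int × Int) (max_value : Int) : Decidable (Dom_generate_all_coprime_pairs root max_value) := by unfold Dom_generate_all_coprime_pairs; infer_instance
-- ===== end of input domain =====

-- B replaces the explicit-stack LIFO loop by a recursive tree traversal (children visited in
-- reversed generation order, filtered inline); objective: alternative decomposition, same cost.

-- ===== PORT A =====

-- helper generate_coprime_pairs of A: build the three candidate children, then filter
def genCoprime (root : Int × Int) (max_value : Int) : List (Int × Int) :=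
  [(root.1 * 2 - root.2, root.1), (root.1 * 2 + root.2, root.1), (root.1 + 2 * root.2, root.2)].filter
    (fun pair => decide (pair.1 ≤ max_value ∧ pair.2 ≤ max_value))

-- measure for the while loop (proof device only; never evaluated at run time)
def loopMeasure (max_value : Int) (stack : List (Int × Int)) : Nat :=
  (stack.map (fun p => 4 ^ ((max_value - p.1).toNat))).sum

theorem loopMeasure_step (max_value : Int) (d : List (Int × Int)) (p : Int × Int)
    (hp : 1 ≤ p.2 ∧ p.2 < p.1) :
    loopMeasure max_value (d ++ genCoprime p max_value) <
      loopMeasure max_value (d ++ [p]) := by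
  obtain ⟨a, b⟩ := p
  simp only [loopMeasure, List.map_append, List.sum_append]
  have key : (List.map (fun q => 4 ^ ((max_value - q.1).toNat)) (genCoprime (a, b) max_value)).sum
      < (List.map (fun q => 4 ^ ((max_value - q.1).toNat)) [(a, b)]).sum := by
    have h4 : ∀ y : Int, a < y → y ≤ max_value →
        4 ^ ((max_value - y).toNat) * 4 ≤ 4 ^ ((max_value - a).toNat) := by
      intro y hxy hym
      have he : (max_value - y).toNat + 1 ≤ (max_value - a).toNat := by omega
      calc 4 ^ ((max_value - y).toNat) * 4 = 4 ^ ((max_value - y).toNat + 1) := by ring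
      _ ≤ 4 ^ ((max_value - a).toNat) := Nat.pow_le_pow_right (by norm_num) he
    have hpos : 0 < 4 ^ ((max_value - a).toNat) := Nat.pow_pos (by norm_num)
    have hsum : (List.map (fun q => 4 ^ ((max_value - q.1).toNat)) (genCoprime (a, b) max_value)).sum
        = (if a * 2 - b ≤ max_value ∧ a ≤ max_value then 4 ^ ((max_value - (a * 2 - b)).toNat) else 0)
        + (if a * 2 + b ≤ max_value ∧ a ≤ max_value then 4 ^ ((max_value - (a * 2 + b)).toNat) else 0)
        + (if a + 2 * b ≤ max_value ∧ b ≤ max_value then 4 ^ ((max_value - (a + 2 * b)).toNat) else 0) := by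
      simp only [genCoprime, List.filter_cons, List.filter_nil, decide_eq_true_eq]
      split_ifs <;> simp <;> omega
    have b1 : (if a * 2 - b ≤ max_value ∧ a ≤ max_value then 4 ^ ((max_value - (a * 2 - b)).toNat) else 0) * 4
        ≤ 4 ^ ((max_value - a).toNat) := by
      split_ifs with h
      · exact h4 _ (by omega) h.1
      · omega
    have b2 : (if a * 2 + b ≤ max_value ∧ a ≤ max_value then 4 ^ ((max_value - (a * 2 + b)).toNat) else 0) * 4
        ≤ 4 ^ ((max_value - a).toNat) := by
      split_ifs with h
      · exact h4 _ (by omega) h.1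
      · omega
    have b3 : (if a + 2 * b ≤ max_value ∧ b ≤ max_value then 4 ^ ((max_value - (a + 2 * b)).toNat) else 0) * 4
        ≤ 4 ^ ((max_value - a).toNat) := by
      split_ifs with h
      · exact h4 _ (by omega) h.1
      · omega
    rw [hsum]
    simp only [List.map_cons, List.map_nil, List.sum_cons, List.sum_nil]
    omega
  omega

-- the while loop of A: pop from the END of `pairs` (Python list.pop()), append the node,
-- push its generated children.  The `if 1 ≤ pair.2 ∧ …` test is ONLY a totality guard:
-- on inputs satisfying Pre_ every stack element satisfies it, so the else-branch is never taken.
def loopA (max_value : Int) (all_pairs stack : List (Int × Int)) : List (Int × Int) :=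
  match h : stack.getLast? with
  | none => all_pairs
  | some pair =>
      if _hg : 1 ≤ pair.2 ∧ pair.2 < pair.1 then
        loopA max_value (all_pairs ++ [pair]) (stack.dropLast ++ genCoprime pair max_value)
      else all_pairs ++ [pair]
termination_by loopMeasure max_value stack
decreasing_by
  have hst : stack = stack.dropLast ++ [pair] := by
    have := List.getLast?_eq_some_iff.mp h
    obtain ⟨ys, rfl⟩ := this
    simp
  conv_rhs => rw [hst]
  exact loopMeasure_step max_value stack.dropLast pair _hg

def generate_all_coprime_pairs (root : Int × Int) (max_value : Int) : List (Int × Int) :=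
  -- all_pairs = [root]; pairs = generate_coprime_pairs(all_pairs[0], max_value)
  loopA max_value [root] (genCoprime root max_value)

-- ===== PORT B =====

-- walk(node): [node] followed by the walks of the kept children, in reversed generation
-- order, each filtered inline.  The outer `if 1 ≤ node.2 ∧ …` is ONLY a totality guard
-- (on inputs satisfying Pre_ it never changes the result, as proved below).
def walkB (max_value : Int) (node : Int × Int) : List (Int × Int) :=
  if _hg : 1 ≤ node.2 ∧ node.2 < node.1 then
    node ::
      ((if node.1 + 2 * node.2 ≤ max_value ∧ node.2 ≤ max_value then
          walkB max_value (node.1 + 2 * node.2, node.2) else []) ++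
       (if node.1 * 2 + node.2 ≤ max_value ∧ node.1 ≤ max_value then
          walkB max_value (node.1 * 2 + node.2, node.1) else []) ++
       (if node.1 * 2 - node.2 ≤ max_value ∧ node.1 ≤ max_value then
          walkB max_value (node.1 * 2 - node.2, node.1) else []))
  else [node]
termination_by (max_value - node.1).toNat
decreasing_by all_goals simp_all; omega

def generate_all_coprime_pairs_alt (root : Int × Int) (max_value : Int) : List (Int × Int) :=
  walkB max_value root

-- ===== PRECONDITION & SPEC =====
-- Pre_ excludes inputs on which A's while loop never terminates (e.g. root (1,1) with
-- max_value ≥ 1 cycles forever).  It keeps the tree's natural domain 1 ≤ b < a (where the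
-- first components strictly grow, so A terminates) and every root none of whose three
-- generated children passes the max_value filter (A then returns [root] at once).
def Pre_generate_all_coprime_pairs (root : Int × Int) (max_value : Int) : Prop :=
  (1 ≤ root.2 ∧ root.2 < root.1) ∨
    (¬(root.1 * 2 - root.2 ≤ max_value ∧ root.1 ≤ max_value) ∧
     ¬(root.1 * 2 + root.2 ≤ max_value ∧ root.1 ≤ max_value) ∧
     ¬(root.1 + 2 * root.2 ≤ max_value ∧ root.2 ≤ max_value))
instance (root : Int × Int) (max_value : Int) : Decidable (Pre_generate_all_coprime_pairs root max_value) := by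
  unfold Pre_generate_all_coprime_pairs; infer_instance

def pvWitness_generate_all_coprime_pairs : (Int × Int) × Int := ((3, 1), 8)

def Spec_generate_all_coprime_pairs (root : Int × Int) (max_value : Int) (out : List (Int × Int)) : Prop := out = generate_all_coprime_pairs_alt root max_value
instance (root : Int × Int) (max_value : Int) (out : List (Int × Int)) : Decidable (Spec_generate_all_coprime_pairs root max_value out) := by unfold Spec_generate_all_coprime_pairs; infer_instance

-- ===== CLAIM (what is proved, stated in full; the proofs are below) =====
def Claim_equal_generate_all_coprime_pairs : Prop := ∀ (root : Int × Int) (max_value : Int), Dom_generate_all_coprime_pairs root max_value → Pre_generate_all_coprime_pairs root max_value → Spec_generate_all_coprime_pairs root max_value (generate_all_coprime_pairs root max_value)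

-- ===== LEMMAS AND PROOFS =====

-- a "good" node: second component ≥ 1 and strictly below the first
def GoodNode (p : Int × Int) : Prop := 1 ≤ p.2 ∧ p.2 < p.1

theorem genCoprime_good {p : Int × Int} (hp : GoodNode p) {max_value : Int} :
    ∀ q ∈ genCoprime p max_value, GoodNode q := by
  obtain ⟨a, b⟩ := p
  obtain ⟨h1, h2⟩ := hp
  intro q hq
  simp only [genCoprime, List.mem_filter, List.mem_cons] at hq
  obtain ⟨hmem, _⟩ := hq
  rcases hmem with rfl | rfl | rfl | h <;> first | (constructor <;> dsimp <;> omega) | simp at h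

-- one unfolding of walkB on a good node, phrased through genCoprime
theorem walkB_good (max_value : Int) (p : Int × Int) (hp : GoodNode p) :
    walkB max_value p = p :: (genCoprime p max_value).reverse.flatMap (walkB max_value) := by
  obtain ⟨a, b⟩ := p
  rw [walkB]
  rw [dif_pos (show 1 ≤ (a, b).2 ∧ (a, b).2 < (a, b).1 from hp)]
  simp only [genCoprime, List.filter_cons, List.filter_nil, decide_eq_true_eq]
  split_ifs <;>
    simp only [List.reverse_cons, List.reverse_nil, List.flatMap_cons, List.flatMap_nil,
      List.flatMap_append, List.nil_append, List.append_nil, List.append_assoc,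
      List.singleton_append]

-- loop invariant: with every stack element good, A's loop appends the reversed-stack
-- preorder walks to the accumulator
theorem loopA_eq (max_value : Int) :
    ∀ (n : Nat) (stack all_pairs : List (Int × Int)), loopMeasure max_value stack ≤ n →
      (∀ p ∈ stack, GoodNode p) →
      loopA max_value all_pairs stack = all_pairs ++ stack.reverse.flatMap (walkB max_value) := by
  intro n
  induction n with
  | zero =>
      intro stack all hn hgood
      have hnil : stack = [] := by
        cases stack with
        | nil => rfl
        | cons x xs =>
            exfalso
            have hm : 0 < loopMeasure max_value (x :: xs) := by
              simp only [loopMeasure, List.map_cons, List.sum_cons]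
              positivity
            omega
      subst hnil
      rw [loopA.eq_def]
      simp
  | succ n ih =>
      intro stack all hn hgood
      rw [loopA.eq_def]
      split
      · next h =>
          simp [List.getLast?_eq_none_iff.mp h]
      · next pair h =>
          have hst : stack = stack.dropLast ++ [pair] := by
            obtain ⟨ys, rfl⟩ := List.getLast?_eq_some_iff.mp h
            simp
          have hpair : GoodNode pair := hgood pair (by rw [hst]; simp)
          rw [dif_pos (show 1 ≤ pair.2 ∧ pair.2 < pair.1 from hpair)]
          have hdec : loopMeasure max_value (stack.dropLast ++ genCoprime pair max_value) ≤ n := by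
            have hlt := loopMeasure_step max_value stack.dropLast pair hpair
            rw [← hst] at hlt
            omega
          rw [ih _ (all ++ [pair]) hdec]
          · conv_rhs => rw [hst]
            rw [List.reverse_append]
            simp [List.flatMap_append, walkB_good max_value pair hpair, List.append_assoc]
          · intro q hq
            rcases List.mem_append.mp hq with hq | hq
            · exact hgood q (by rw [hst]; exact List.mem_append.mpr (Or.inl hq))
            · exact genCoprime_good hpair q hq

theorem childless_gen_nil {root : Int × Int} {max_value : Int}
    (h : ¬(root.1 * 2 - root.2 ≤ max_value ∧ root.1 ≤ max_value) ∧
         ¬(root.1 * 2 + root.2 ≤ max_value ∧ root.1 ≤ max_value) ∧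
         ¬(root.1 + 2 * root.2 ≤ max_value ∧ root.2 ≤ max_value)) :
    genCoprime root max_value = [] := by
  obtain ⟨a, b⟩ := root
  obtain ⟨h1, h2, h3⟩ := h
  simp only [genCoprime, List.filter_cons, List.filter_nil, decide_eq_true_eq]
  split_ifs <;> simp_all

-- ===== VERDICT (by name: the statement is the Claim_ definition above) =====
theorem generate_all_coprime_pairs_spec : Claim_equal_generate_all_coprime_pairs := by
  intro root max_value _ hpre
  unfold Spec_generate_all_coprime_pairs generate_all_coprime_pairs generate_all_coprime_pairs_alt
  by_cases hgood : GoodNode root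
  · rw [loopA_eq max_value (loopMeasure max_value (genCoprime root max_value)) _ [root] le_rfl (genCoprime_good hgood)]
    rw [walkB_good max_value root hgood]
    simp
  · rcases hpre with hpre | hch
    · exact absurd hpre hgood
    · rw [childless_gen_nil hch, loopA.eq_def]
      simp only [List.getLast?_nil]
      rw [walkB, dif_neg (show ¬(1 ≤ root.2 ∧ root.2 < root.1) from hgood)]
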